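-- pv_equiv track=rewrite | github.com/scarpenter7/AdventOfCode2019 | 4.1/4.1.py | getRepeatLength
-- ===== SOURCE A (Python) =====
-- def getRepeatLength(digitList, num):
--     length = 0
--     numFound = False
--     for i in range(len(digitList)):
--         if digitList[i] == num:
--             length += 1
--             numFound = True
--         elif numFound:
--             break
--     return length
-- ===== SOURCE B (Python) =====
-- def getRepeatLength(digitList, num):
--     if num not in digitList:
--         return 0
--     start = digitList.index(num)
--     count = 0
--     while start + count < len(digitList) and digitList[start + count] == num:
--         count += 1
--     return count
-- ===== Notes on version B (the rewrite author's own statement) =====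
-- stated objective: simpler
-- what changed: Replaces the flag-carrying scan with break by a two-phase find-then-count: locate the first occurrence of num and count the run from there.
import Mathlib
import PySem

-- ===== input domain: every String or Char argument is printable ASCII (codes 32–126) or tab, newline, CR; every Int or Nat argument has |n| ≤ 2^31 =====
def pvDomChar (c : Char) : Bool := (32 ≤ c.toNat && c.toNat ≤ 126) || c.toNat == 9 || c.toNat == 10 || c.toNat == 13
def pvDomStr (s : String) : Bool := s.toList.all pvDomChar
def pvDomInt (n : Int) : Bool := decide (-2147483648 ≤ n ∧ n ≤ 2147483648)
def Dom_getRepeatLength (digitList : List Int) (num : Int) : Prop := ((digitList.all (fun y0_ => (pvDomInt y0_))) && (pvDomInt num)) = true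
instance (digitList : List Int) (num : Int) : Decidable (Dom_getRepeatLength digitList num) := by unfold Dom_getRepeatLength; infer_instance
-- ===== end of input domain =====

-- B replaces A's flag-carrying scan-with-break by a two-phase find-then-count decomposition (simpler).


-- ===== PORT A =====
-- A's loop over indices, carried as structural recursion over the list with state (length, numFound);
-- 'break' becomes returning the accumulated length.
def getRepeatLengthGo (num : Int) : List Int → Int → Bool → Int
  | [], length, _ => length
  | x :: xs, length, numFound =>
    if x == num then getRepeatLengthGo num xs (length + 1) true
    else if numFound then length
    else getRepeatLengthGo num xs length numFound

def getRepeatLength (digitList : List Int) (num : Int) : Int :=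
  getRepeatLengthGo num digitList 0 false

-- ===== PORT B =====
-- phase 1: find the suffix starting at the first occurrence of num (none if absent)
def findSuffix (num : Int) : List Int → Option (List Int)
  | [] => none
  | x :: xs => if x == num then some (x :: xs) else findSuffix num xs

-- phase 2: count the run of num at the head
def countRun (num : Int) : List Int → Int
  | [] => 0
  | x :: xs => if x == num then 1 + countRun num xs else 0

def getRepeatLength_alt (digitList : List Int) (num : Int) : Int :=
  match findSuffix num digitList with
  | none => 0
  | some l => countRun num l

-- ===== PRECONDITION & SPEC =====
def Spec_getRepeatLength (digitList : List Int) (num : Int) (out : Int) : Prop := out = getRepeatLength_alt digitList num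
instance (digitList : List Int) (num : Int) (out : Int) : Decidable (Spec_getRepeatLength digitList num out) := by unfold Spec_getRepeatLength; infer_instance

-- ===== CLAIM (what is proved, stated in full; the proofs are below) =====
def Claim_equal_getRepeatLength : Prop := ∀ (digitList : List Int) (num : Int), Dom_getRepeatLength digitList num → Spec_getRepeatLength digitList num (getRepeatLength digitList num)

-- ===== LEMMAS AND PROOFS =====
theorem go_found (num : Int) (xs : List Int) (len : Int) :
    getRepeatLengthGo num xs len true = len + countRun num xs := by
  induction xs generalizing len with
  | nil => simp [getRepeatLengthGo, countRun]
  | cons x xs ih =>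
    by_cases h : x = num <;> simp [getRepeatLengthGo, countRun, h, ih] <;> ring

theorem go_notfound (num : Int) (xs : List Int) :
    getRepeatLengthGo num xs 0 false =
      match findSuffix num xs with
      | none => 0
      | some l => countRun num l := by
  induction xs with
  | nil => simp [getRepeatLengthGo, findSuffix]
  | cons x xs ih =>
    by_cases h : x = num
    · simp [getRepeatLengthGo, findSuffix, countRun, h, go_found]
    · simpa [getRepeatLengthGo, findSuffix, h] using ih

-- ===== VERDICT (by name: the statement is the Claim_ definition above) =====
theorem getRepeatLength_spec : Claim_equal_getRepeatLength := by
  intro digitList num _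
  unfold Spec_getRepeatLength getRepeatLength getRepeatLength_alt
  exact go_notfound num digitList
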